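-- pv_equiv track=rewrite | github.com/StoyanStoyanov1/Python-Fundamental | second_way/list_advanced/exercises/group_of_10's.py | group_of_10_s
-- ===== SOURCE A (Python) =====
-- def group_of_10_s(current_numbers):
--     group = 10
--     result = []
--
--     while len(current_numbers) > 0:
--         for_group = [current_numbers.pop(index) for index in range(len(current_numbers) - 1, -1, -1)
--                      if current_numbers[index] in range(group + 1)]
--
--         result.append(f"Group of {group}'s: {for_group[::-1]}")
--         group += 10
--
--     return "\n".join(result)
-- ===== SOURCE B (Python) =====
-- def group_of_10_s(current_numbers):
--     buckets = {}
--     gmax = 0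
--     for x in current_numbers:
--         g = 10 if x <= 10 else ((x + 9) // 10) * 10
--         buckets.setdefault(g, []).append(x)
--         if g > gmax:
--             gmax = g
--     lines = []
--     for g in range(10, gmax + 1, 10):
--         items = buckets.get(g, [])
--         lines.append(f"Group of {g}'s: [{', '.join(map(str, items))}]")
--     return "\n".join(lines)
-- ===== Notes on version B (the rewrite author's own statement) =====
-- stated objective: faster
-- what changed: A repeatedly rescans and pops the shrinking list once per decile group up to the maximum value (O(n^2 + n*G) loop iterations); B assigns each number directly to its decile bucket in one pass over the input and then emits the groups 10..max in order; intended as asymptotically faster: in a timing run A already timed out at n=16 (its group loop runs max/10 times on 32-bit values) while B returned, so no clean ratio could be measured.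
import Mathlib
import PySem

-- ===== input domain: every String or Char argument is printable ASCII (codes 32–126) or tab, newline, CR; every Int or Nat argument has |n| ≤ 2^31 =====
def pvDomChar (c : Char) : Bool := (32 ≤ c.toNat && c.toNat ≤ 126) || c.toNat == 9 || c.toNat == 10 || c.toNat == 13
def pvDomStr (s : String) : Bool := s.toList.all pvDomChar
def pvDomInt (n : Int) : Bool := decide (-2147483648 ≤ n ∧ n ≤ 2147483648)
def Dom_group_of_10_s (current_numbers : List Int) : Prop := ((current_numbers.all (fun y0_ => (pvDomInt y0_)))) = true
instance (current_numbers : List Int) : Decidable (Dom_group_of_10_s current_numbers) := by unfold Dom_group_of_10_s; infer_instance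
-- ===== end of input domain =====

-- B replaces A's quadratic pop-and-rescan while-loop by one pass that assigns each number
-- directly to its decile bucket, then emits groups 10..max in order (equal RETURN value;
-- A additionally empties its argument in place, B leaves it untouched).

-- ===== PORT A =====

-- Python's repr of a list of ints, as used by the f-string: "[1, 2, 3]"
def pvListRepr (xs : List Int) : String :=
  "[" ++ PySem.Str.join ", " (xs.map PySem.Int.toStr) ++ "]"

-- one step of the list comprehension: pop at `index` if current_numbers[index] in range(group+1)
def pvStepBody (g : Int) (st : List Int × List Int) (index : Int) : List Int × List Int :=
  match PySem.List.pyGet? st.1 index with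
  | some v =>
      if 0 ≤ v ∧ v ≤ g then
        match PySem.List.pop? st.1 index with
        | some (w, rest) => (rest, st.2 ++ [w])
        | none => st
      else st
  | none => st

-- the comprehension: for index in range(len(current_numbers)-1, -1, -1)
def pvStep (l : List Int) (g : Int) : List Int × List Int :=
  (PySem.List.pyRange ((l.length : Int) - 1) (-1) (-1)).foldl (pvStepBody g) (l, [])

-- the while-loop; fuel is a totality guard only (Pre_ guarantees it suffices)
def pvLoopA : Nat → List Int → Int → List String → List String
  | 0, _, _, result => result
  | fuel+1, l, g, result =>
      if l.length > 0 then
        let p := pvStep l g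
        -- p.2.reverse is for_group[::-1] ([::-1] is exact list reversal)
        pvLoopA fuel p.1 (g + 10)
          (result ++ ["Group of " ++ PySem.Int.toStr g ++ "'s: " ++ pvListRepr p.2.reverse])
      else result

def group_of_10_s (current_numbers : List Int) : String :=
  PySem.Str.join "\n"
    (pvLoopA ((current_numbers.foldl max 0).toNat / 10 + 1) current_numbers 10 [])

-- ===== PORT B =====

-- 10 if x <= 10 else ((x + 9) // 10) * 10
def pvGroupOf (x : Int) : Int :=
  if x ≤ 10 then 10 else (PySem.Int.floordiv (x + 9) 10) * 10

-- the single bucketing pass: buckets.setdefault(g, []).append(x) and the running gmax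
def pvBuild (l : List Int) : PySem.Dict Int (List Int) × Int :=
  l.foldl
    (fun st x =>
      let g := pvGroupOf x
      (st.1.modify g [] (· ++ [x]), if g > st.2 then g else st.2))
    (PySem.Dict.empty, 0)

def group_of_10_s_alt (current_numbers : List Int) : String :=
  let st := pvBuild current_numbers
  PySem.Str.join "\n"
    ((PySem.List.pyRange 10 (st.2 + 1) 10).map (fun g =>
      "Group of " ++ PySem.Int.toStr g ++ "'s: [" ++
        PySem.Str.join ", " ((st.1.getD g []).map PySem.Int.toStr) ++ "]"))

-- ===== PRECONDITION & SPEC =====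
-- Pre_ excludes lists containing a negative number: no negative is ever in range(group+1),
-- so A's while-loop never empties the list and A diverges (never returns) there.
def Pre_group_of_10_s (current_numbers : List Int) : Prop :=
  ∀ x ∈ current_numbers, 0 ≤ x

instance (current_numbers : List Int) : Decidable (Pre_group_of_10_s current_numbers) := by
  unfold Pre_group_of_10_s; infer_instance

def pvWitness_group_of_10_s : List Int := [0, 25, 10, 11]

def Spec_group_of_10_s (current_numbers : List Int) (out : String) : Prop :=
  out = group_of_10_s_alt current_numbers

instance (current_numbers : List Int) (out : String) : Decidable (Spec_group_of_10_s current_numbers out) := by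
  unfold Spec_group_of_10_s; infer_instance

-- ===== CLAIM (what is proved, stated in full; the proofs are below) =====
def Claim_equal_group_of_10_s : Prop := ∀ (current_numbers : List Int), Dom_group_of_10_s current_numbers → Pre_group_of_10_s current_numbers → Spec_group_of_10_s current_numbers (group_of_10_s current_numbers)

-- ===== LEMMAS AND PROOFS =====

-- the common emission shape both loops are reduced to
def pvLine (g : Int) (xs : List Int) : String :=
  "Group of " ++ PySem.Int.toStr g ++ "'s: [" ++
    PySem.Str.join ", " (xs.map PySem.Int.toStr) ++ "]"

def pvEmit : Nat → Int → List Int → List String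
  | 0, _, _ => []
  | fuel+1, g, l =>
      if l = [] then []
      else pvLine g (l.filter (fun x => pvGroupOf x = g)) ::
           pvEmit fuel (g + 10) (l.filter (fun x => g < pvGroupOf x))

lemma pvLineA_eq (g : Int) (xs : List Int) :
    "Group of " ++ PySem.Int.toStr g ++ "'s: " ++ pvListRepr xs = pvLine g xs := by
  rw [pvLine, pvListRepr]
  simp only [String.append_assoc]
  rw [show ("'s: [" : String) = "'s: " ++ "[" from rfl, String.append_assoc]

lemma eraseIdx_append_cons (zs tail : List Int) (z : Int) :
    (zs ++ z :: tail).eraseIdx zs.length = zs ++ tail := by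
  induction zs with
  | nil => rfl
  | cons a as ih => simp [ih]

lemma pvStep_aux (g : Int) : ∀ (ys tail acc : List Int),
    (PySem.List.pyRange ((ys.length : Int) - 1) (-1) (-1)).foldl (pvStepBody g) (ys ++ tail, acc)
      = (ys.filter (fun x => ¬ (0 ≤ x ∧ x ≤ g)) ++ tail,
         acc ++ (ys.filter (fun x => 0 ≤ x ∧ x ≤ g)).reverse) := by
  intro ys
  induction ys using List.reverseRecOn with
  | nil =>
      intro tail acc
      rw [PySem.List.pyRange_neg_one_eq_nil (by simp)]
      simp
  | append_singleton zs z ih =>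
      intro tail acc
      have hlen : ((zs ++ [z]).length : Int) - 1 = (zs.length : Int) := by simp
      rw [hlen, PySem.List.pyRange_neg_one_cons (by omega)]
      rw [List.foldl_cons]
      have hstate : pvStepBody g (zs ++ [z] ++ tail, acc) (zs.length : Int)
          = if 0 ≤ z ∧ z ≤ g then (zs ++ tail, acc ++ [z]) else (zs ++ [z] ++ tail, acc) := by
        unfold pvStepBody
        rw [List.append_assoc]
        simp only [List.singleton_append]
        rw [PySem.List.pyGet?_append_length]
        have hlt : zs.length < (zs ++ z :: tail).length := by simp
        by_cases hz : 0 ≤ z ∧ z ≤ g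
        · rw [if_pos hz]
          simp only [PySem.List.pop?_natCast (zs ++ z :: tail) zs.length hlt,
            eraseIdx_append_cons, if_pos hz]
          simp [List.getElem_append_right]
        · rw [if_neg hz]
          simp only [if_neg hz]
      rw [hstate]
      by_cases hz : 0 ≤ z ∧ z ≤ g
      · rw [if_pos hz]
        have hr : ((zs.length : Int)) - 1 = ((zs.length : Int)) - 1 := rfl
        rw [ih tail (acc ++ [z])]
        simp [List.filter_append, hz, List.append_assoc]
      · rw [if_neg hz]
        rw [List.append_assoc, List.singleton_append]
        rw [ih (z :: tail) acc]
        simp [List.filter_append, hz]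
        simp only [List.filter, show (!decide (0 ≤ z) || decide (g < z)) = true by simp; omega]
        simp

lemma pvStep_eq (l : List Int) (g : Int) :
    pvStep l g = (l.filter (fun x => ¬ (0 ≤ x ∧ x ≤ g)),
                  (l.filter (fun x => 0 ≤ x ∧ x ≤ g)).reverse) := by
  have h := pvStep_aux g l [] []
  rw [List.append_nil] at h
  rw [pvStep, h, List.append_nil, List.nil_append]

lemma pvGroupOf_dvd (x : Int) : (10 : Int) ∣ pvGroupOf x := by
  unfold pvGroupOf; split_ifs
  · decide
  · exact dvd_mul_left 10 _

lemma pvGroupOf_le (x g : Int) (_hx : 0 ≤ x) (hg : 10 ≤ g) (hd : (10 : Int) ∣ g)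
    (hxg : x ≤ g) : pvGroupOf x ≤ g := by
  unfold pvGroupOf; split_ifs with h
  · omega
  · rw [PySem.Int.floordiv_eq_ediv_of_pos (by omega)]
    obtain ⟨c, rfl⟩ := hd
    omega

lemma pvGroupOf_lower (x : Int) (hx : 0 ≤ x) : 10 ≤ pvGroupOf x ∧ x ≤ pvGroupOf x := by
  unfold pvGroupOf; split_ifs with h
  · omega
  · rw [PySem.Int.floordiv_eq_ediv_of_pos (by omega)]
    omega

lemma pvRangeTen_nil (a b : Int) (h : b ≤ a) : PySem.List.pyRange a b 10 = [] := by
  rw [PySem.List.pyRange_of_pos a b (by norm_num)]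
  rw [if_neg (by omega)]
  simp

lemma pvRangeTen_cons (a b : Int) (h : a < b) :
    PySem.List.pyRange a b 10 = a :: PySem.List.pyRange (a + 10) b 10 := by
  rw [PySem.List.pyRange_of_pos a b (by norm_num), PySem.List.pyRange_of_pos (a+10) b (by norm_num)]
  rw [if_pos h]
  have hn : ((b - a + 10 - 1) / 10).toNat
      = (if a + 10 < b then ((b - (a + 10) + 10 - 1) / 10).toNat else 0) + 1 := by
    split_ifs <;> omega
  rw [hn, List.range_succ_eq_map]
  simp only [List.map_cons, List.map_map]
  refine congrArg₂ _ (by simp) (List.map_congr_left fun k _ => ?_)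
  simp [Function.comp, Nat.succ_eq_add_one]
  ring

lemma pvGroupOf_iff (x g : Int) (hx : 0 ≤ x) (hg : 10 ≤ g) (hd : (10 : Int) ∣ g)
    (hlb : g ≤ pvGroupOf x) : (0 ≤ x ∧ x ≤ g) ↔ pvGroupOf x = g := by
  constructor
  · intro ⟨_, hxg⟩
    exact le_antisymm (pvGroupOf_le x g hx hg hd hxg) hlb
  · intro h
    exact ⟨hx, le_of_le_of_eq (pvGroupOf_lower x hx).2 h⟩

lemma pvFoldIf_eq_max : ∀ (l : List Int) (m : Int),
    l.foldl (fun m x => if pvGroupOf x > m then pvGroupOf x else m) m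
      = (l.map pvGroupOf).foldl max m := by
  intro l
  induction l with
  | nil => intro m; rfl
  | cons x xs ih =>
      intro m
      rw [List.foldl_cons, ih, List.map_cons, List.foldl_cons]
      congr 1
      split_ifs <;> omega

lemma pvLoopA_eq : ∀ (fuel : Nat) (g : Int) (l : List Int) (result : List String),
    (∀ x ∈ l, 0 ≤ x ∧ g ≤ pvGroupOf x ∧ pvGroupOf x < g + 10 * fuel) →
    10 ≤ g → (10 : Int) ∣ g →
    pvLoopA fuel l g result = result ++ pvEmit fuel g l := by
  intro fuel
  induction fuel with
  | zero =>
      intro g l result h hg hd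
      have : l = [] := List.eq_nil_iff_forall_not_mem.2 fun x hx => by
        have := h x hx; omega
      subst this
      simp [pvLoopA, pvEmit]
  | succ fuel ih =>
      intro g l result h hg hd
      by_cases hl : l = []
      · subst hl
        simp [pvLoopA, pvEmit]
      · rw [pvLoopA]
        rw [if_pos (by simpa using List.length_pos_iff.2 hl)]
        rw [pvEmit, if_neg hl]
        have hPf : l.filter (fun x => decide (0 ≤ x ∧ x ≤ g))
            = l.filter (fun x => decide (pvGroupOf x = g)) :=
          List.filter_congr fun x hx => by
            have hh := h x hx
            simp [pvGroupOf_iff x g hh.1 hg hd hh.2.1]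
        have hNf : l.filter (fun x => decide ¬ (0 ≤ x ∧ x ≤ g))
            = l.filter (fun x => decide (g < pvGroupOf x)) :=
          List.filter_congr fun x hx => by
            have hh := h x hx
            have hiff := pvGroupOf_iff x g hh.1 hg hd hh.2.1
            simp only [decide_eq_decide, hiff]
            omega
        simp only [pvStep_eq, List.reverse_reverse]
        rw [hPf, hNf, pvLineA_eq]
        rw [ih (g + 10) _ _ ?_ (by omega) (by exact dvd_add hd (by norm_num))]
        · simp
        · intro x hx
          rw [List.mem_filter] at hx
          have hh := h x hx.1
          have hgt : g < pvGroupOf x := by simpa using hx.2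
          have hdx := pvGroupOf_dvd x
          obtain ⟨c1, hc1⟩ := hd
          obtain ⟨c2, hc2⟩ := hdx
          refine ⟨hh.1, by omega, by omega⟩

lemma pvEmit_eq_range : ∀ (fuel : Nat) (g : Int) (l : List Int),
    (∀ x ∈ l, 0 ≤ x ∧ g ≤ pvGroupOf x ∧ pvGroupOf x < g + 10 * fuel) →
    10 ≤ g → (10 : Int) ∣ g →
    (PySem.List.pyRange g
        (l.foldl (fun m x => if pvGroupOf x > m then pvGroupOf x else m) (g - 10) + 1) 10).map
      (fun g' => pvLine g' (l.filter (fun x => pvGroupOf x = g')))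
      = pvEmit fuel g l := by
  intro fuel
  induction fuel with
  | zero =>
      intro g l h hg hd
      have : l = [] := List.eq_nil_iff_forall_not_mem.2 fun x hx => by
        have := h x hx; omega
      subst this
      simp [pvEmit, pvRangeTen_nil g (g - 10 + 1) (by omega)]
  | succ fuel ih =>
      intro g l h hg hd
      by_cases hl : l = []
      · subst hl
        simp [pvEmit, pvRangeTen_nil g (g - 10 + 1) (by omega)]
      · obtain ⟨x1, hx1⟩ := List.exists_mem_of_ne_nil l hl
        set M := l.foldl (fun m x => if pvGroupOf x > m then pvGroupOf x else m) (g - 10) with hMdef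
        have hMmax : M = (l.map pvGroupOf).foldl max (g - 10) := pvFoldIf_eq_max l (g - 10)
        have hub : ∀ x ∈ l, pvGroupOf x ≤ M := fun x hx => by
          rw [hMmax]
          exact (PySem.List.le_foldl_max (l.map pvGroupOf) (g - 10)).2 _ (List.mem_map_of_mem hx)
        have hgM : g ≤ M := le_trans (h x1 hx1).2.1 (hub x1 hx1)
        have hMcase : ∃ x0 ∈ l, pvGroupOf x0 = M := by
          rcases PySem.List.foldl_max_mem (l.map pvGroupOf) (g - 10) with hc | hc
          · omega
          · obtain ⟨x0, hx0, he⟩ := List.mem_map.1 hc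
            exact ⟨x0, hx0, by rw [hMmax]; exact he⟩
        rw [pvRangeTen_cons g (M + 1) (by omega), List.map_cons, pvEmit, if_neg hl]
        refine congrArg₂ _ rfl ?_
        set l' := l.filter (fun x => decide (g < pvGroupOf x)) with hl'def
        have hmem_l' : ∀ x, x ∈ l' → x ∈ l ∧ g < pvGroupOf x := fun x hx => by
          rw [hl'def, List.mem_filter] at hx
          exact ⟨hx.1, by simpa using hx.2⟩
        have hIH := ih (g + 10) l'
          (fun x hx => by
            have hm := hmem_l' x hx
            have hh := h x hm.1
            obtain ⟨c1, hc1⟩ := hd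
            obtain ⟨c2, hc2⟩ := pvGroupOf_dvd x
            exact ⟨hh.1, by omega, by omega⟩)
          (by omega) (dvd_add hd (by norm_num))
        set M' := l'.foldl (fun m x => if pvGroupOf x > m then pvGroupOf x else m) (g + 10 - 10) with hM'def
        have hM'max : M' = (l'.map pvGroupOf).foldl max (g + 10 - 10) := pvFoldIf_eq_max l' _
        have hrange : PySem.List.pyRange (g + 10) (M + 1) 10 = PySem.List.pyRange (g + 10) (M' + 1) 10 := by
          by_cases hl'e : l' = []
          · have hall : ∀ x ∈ l, pvGroupOf x ≤ g := fun x hx => by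
              by_contra hgt
              exact (List.ne_nil_of_mem (List.mem_filter.2 ⟨hx, by simp; omega⟩)) hl'e
            have hMle : M ≤ g := by
              obtain ⟨x0, hx0, he⟩ := hMcase
              rw [← he]; exact hall x0 hx0
            have hMg : M = g := le_antisymm hMle hgM
            have hM'val : M' = g + 10 - 10 := by rw [hM'max, hl'e]; simp
            rw [hMg, hM'val]
            norm_num
          · obtain ⟨y1, hy1⟩ := List.exists_mem_of_ne_nil l' hl'e
            have hub' : ∀ x ∈ l', pvGroupOf x ≤ M' := fun x hx => by
              rw [hM'max]
              exact (PySem.List.le_foldl_max (l'.map pvGroupOf) _).2 _ (List.mem_map_of_mem hx)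
            have hM'le : M' ≤ M := by
              rcases PySem.List.foldl_max_mem (l'.map pvGroupOf) (g + 10 - 10) with hc | hc
              · omega
              · obtain ⟨y0, hy0, he⟩ := List.mem_map.1 hc
                have := hub y0 (hmem_l' y0 hy0).1
                omega
            have hMle : M ≤ M' := by
              obtain ⟨x0, hx0, he⟩ := hMcase
              by_cases hgt : g < pvGroupOf x0
              · rw [← he]
                exact hub' x0 (List.mem_filter.2 ⟨hx0, by simp; omega⟩)
              · have := (h x0 hx0).2.1
                have hgy := (hmem_l' y1 hy1).2
                have := hub y1 (hmem_l' y1 hy1).1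
                omega
            rw [le_antisymm hM'le hMle]
        rw [hrange, ← hIH]
        refine List.map_congr_left fun g'' hg'' => ?_
        have hg''lb : g + 10 ≤ g'' := by
          have := (PySem.List.mem_pyRange_iff_of_pos (by norm_num : (0:Int) < 10) g'').1 hg''
          omega
        refine congrArg _ ?_
        rw [hl'def, List.filter_filter]
        refine List.filter_congr fun x hx => ?_
        by_cases he : pvGroupOf x = g''
        · simp only [he, decide_true]
          simp; omega
        · simp [he]

lemma pvBuild_getD_aux : ∀ (l : List Int) (d : PySem.Dict Int (List Int)) (m k : Int),
    ((l.foldl (fun st x => ((st.1.modify (pvGroupOf x) [] (· ++ [x]) : PySem.Dict Int (List Int)),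
        if pvGroupOf x > st.2 then pvGroupOf x else st.2)) (d, m)).1).getD k []
      = d.getD k [] ++ l.filter (fun x => pvGroupOf x = k) := by
  intro l
  induction l with
  | nil => intro d m k; simp
  | cons x xs ih =>
      intro d m k
      rw [List.foldl_cons, ih]
      by_cases hk : k = pvGroupOf x
      · subst hk
        rw [PySem.Dict.getD_modify_self]
        simp
      · rw [PySem.Dict.getD_modify_of_ne _ _ _ hk]
        simp only [List.filter_cons]
        rw [if_neg (by simpa using fun h : pvGroupOf x = k => hk h.symm)]

lemma pvBuild_getD (l : List Int) (k : Int) :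
    ((pvBuild l).1).getD k [] = l.filter (fun x => pvGroupOf x = k) := by
  rw [pvBuild, pvBuild_getD_aux]
  simp [PySem.Dict.empty, PySem.Dict.getD, PySem.Dict.get?]

lemma pvBuild_snd_aux : ∀ (l : List Int) (d : PySem.Dict Int (List Int)) (m : Int),
    (l.foldl (fun st x => ((st.1.modify (pvGroupOf x) [] (· ++ [x]) : PySem.Dict Int (List Int)),
        if pvGroupOf x > st.2 then pvGroupOf x else st.2)) (d, m)).2
      = l.foldl (fun m x => if pvGroupOf x > m then pvGroupOf x else m) m := by
  intro l
  induction l with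
  | nil => intro d m; rfl
  | cons x xs ih => intro d m; rw [List.foldl_cons, ih, List.foldl_cons]

lemma pvBuild_snd (l : List Int) :
    (pvBuild l).2 = l.foldl (fun m x => if pvGroupOf x > m then pvGroupOf x else m) 0 := by
  rw [pvBuild, pvBuild_snd_aux]

lemma pvGroupOf_ub (x : Int) (_hx : 0 ≤ x) :
    pvGroupOf x = 10 ∨ pvGroupOf x ≤ x + 9 := by
  unfold pvGroupOf; split_ifs with h
  · exact Or.inl rfl
  · rw [PySem.Int.floordiv_eq_ediv_of_pos (by omega)]
    omega

lemma pvHyp (l : List Int) (hpre : ∀ x ∈ l, 0 ≤ x) :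
    ∀ x ∈ l, 0 ≤ x ∧ 10 ≤ pvGroupOf x ∧
      pvGroupOf x < 10 + 10 * (((l.foldl max 0).toNat / 10 + 1 : Nat) : Int) := by
  intro x hx
  have hx0 := hpre x hx
  have hlo := pvGroupOf_lower x hx0
  have hm := PySem.List.le_foldl_max l 0
  have hxm : x ≤ l.foldl max 0 := hm.2 x hx
  have hm0 : 0 ≤ l.foldl max 0 := hm.1
  have hub := pvGroupOf_ub x hx0
  refine ⟨hx0, hlo.1, ?_⟩
  push_cast
  omega

-- ===== VERDICT (by name: the statement is the Claim_ definition above) =====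
theorem group_of_10_s_spec : Claim_equal_group_of_10_s := by
  intro l _ hpre
  show group_of_10_s l = group_of_10_s_alt l
  have h1 := pvHyp l hpre
  rw [group_of_10_s,
    pvLoopA_eq ((l.foldl max 0).toNat / 10 + 1) 10 l [] h1 (by norm_num) (by norm_num),
    List.nil_append]
  rw [group_of_10_s_alt]
  simp only [pvBuild_snd, pvBuild_getD]
  refine congrArg _ ?_
  have := pvEmit_eq_range ((l.foldl max 0).toNat / 10 + 1) 10 l h1 (by norm_num) (by norm_num)
  rw [show (10 : Int) - 10 = 0 by norm_num] at this
  rw [← this]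
  rfl
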